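-- pv_equiv track=rewrite | github.com/sea-lab-space/MIND | BE-mh-narrative-dashboard/passive_data_extraction/utils/feature_loader_allday.py | _get_usable_feature_name
-- ===== SOURCE A (Python) =====
-- def _get_usable_feature_name(col):
--     parts = col.split(':')
--     if len(parts) >= 2:
--         feature_part = parts[1]
--         feature_name_split = feature_part.split("_")
--         feature_name_after = ["rapids", "doryab", "barnett", "locmap"]
--         actual_name_split = []
--         flag = False
--         for feature_split in feature_name_split:
--             if flag:
--                 actual_name_split.append(feature_split)
--             if feature_split in feature_name_after:
--                 flag = True
--         actual_name = "_".join(actual_name_split)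
--         return actual_name + ":" + parts[-1]
--     else:
--         return col
-- ===== SOURCE B (Python) =====
-- def _get_usable_feature_name(col):
--     parts = col.split(':')
--     if len(parts) < 2:
--         return col
--     tokens = parts[1].split('_')
--     positions = [tokens.index(m) for m in ("rapids", "doryab", "barnett", "locmap") if m in tokens]
--     name = '_'.join(tokens[min(positions) + 1:]) if positions else ''
--     return name + ':' + parts[-1]
-- ===== Notes on version B (the rewrite author's own statement) =====
-- stated objective: alternative
-- what changed: Instead of one flagged scan over the tokens, B does a staged pass per marker word (tokens.index for each of the four markers that occur) and takes the minimum of those indices, then joins the token slice after it.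
import Mathlib
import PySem

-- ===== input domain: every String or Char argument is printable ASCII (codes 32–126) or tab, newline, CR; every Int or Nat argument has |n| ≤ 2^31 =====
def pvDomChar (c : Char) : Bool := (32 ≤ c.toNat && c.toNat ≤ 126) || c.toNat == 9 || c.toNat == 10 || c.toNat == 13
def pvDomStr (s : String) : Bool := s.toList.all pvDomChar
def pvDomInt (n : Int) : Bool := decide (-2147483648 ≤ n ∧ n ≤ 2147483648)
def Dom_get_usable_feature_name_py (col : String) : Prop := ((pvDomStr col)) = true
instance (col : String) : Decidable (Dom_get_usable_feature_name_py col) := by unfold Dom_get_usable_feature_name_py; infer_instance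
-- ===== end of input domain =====

-- B replaces A's flag-and-accumulate scan with per-marker tokens.index passes and a min over those indices, then a slice-and-join (alternative decomposition, same cost).


-- ===== PORT A =====
-- A's marker list `feature_name_after`
def pvMarkersA : List String := ["rapids", "doryab", "barnett", "locmap"]

-- the body of A's for-loop (one step of the flag-and-accumulate scan)
def pvStepA (st : List String × Bool) (feature_split : String) : List String × Bool :=
  let acc := if st.2 then st.1 ++ [feature_split] else st.1
  let flag := if pvMarkersA.contains feature_split then true else st.2
  (acc, flag)

def get_usable_feature_name_py (col : String) : String :=
  let parts := (PySem.Str.split? col ":").getD []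
  if parts.length ≥ 2 then
    let feature_part := (PySem.List.pyGet? parts 1).getD ""
    let feature_name_split := (PySem.Str.split? feature_part "_").getD []
    let st := feature_name_split.foldl pvStepA ([], false)
    let actual_name := PySem.Str.join "_" st.1
    actual_name ++ ":" ++ (PySem.List.pyGet? parts (-1)).getD ""
  else col

-- ===== PORT B =====
-- B's marker tuple
def pvMarkersB : List String := ["rapids", "doryab", "barnett", "locmap"]

def get_usable_feature_name_py_alt (col : String) : String :=
  let parts := (PySem.Str.split? col ":").getD []
  if parts.length < 2 then col
  else
    let tokens := (PySem.Str.split? ((PySem.List.pyGet? parts 1).getD "") "_").getD []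
    -- [tokens.index(m) for m in markers if m in tokens]  (index? is none exactly when m ∉ tokens)
    let positions := pvMarkersB.filterMap (fun m => PySem.List.index? tokens m)
    let name :=
      match PySem.List.min? positions (fun x => x) with
      | some i => PySem.Str.join "_" (PySem.List.slice tokens (some ((i : Int) + 1)) none)
      | none => ""
    name ++ ":" ++ (PySem.List.pyGet? parts (-1)).getD ""

-- ===== PRECONDITION & SPEC =====
def Spec_get_usable_feature_name_py (col : String) (out : String) : Prop := out = get_usable_feature_name_py_alt col
instance (col : String) (out : String) : Decidable (Spec_get_usable_feature_name_py col out) := by unfold Spec_get_usable_feature_name_py; infer_instance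

-- ===== CLAIM =====
def Claim_equal_get_usable_feature_name_py : Prop := ∀ (col : String), Dom_get_usable_feature_name_py col → Spec_get_usable_feature_name_py col (get_usable_feature_name_py col)

-- ===== LEMMAS AND PROOFS =====

-- A's flag-and-accumulate loop collects exactly the tokens after the first marker
theorem pv_loop_eq_drop (ts : List String) : ∀ (acc : List String) (flag : Bool),
    (ts.foldl pvStepA (acc, flag)).1
    = acc ++ (if flag then ts else
        match ts.findIdx? (fun t => pvMarkersA.contains t) with
        | some i => ts.drop (i + 1)
        | none => []) := by
  induction ts with
  | nil => intro acc flag; cases flag <;> simp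
  | cons t ts ih =>
    intro acc flag
    cases flag with
    | true =>
      have hstep : pvStepA (acc, true) t = (acc ++ [t], true) := by simp [pvStepA]
      rw [List.foldl_cons, hstep, ih]; simp
    | false =>
      by_cases hm : t ∈ pvMarkersA
      · have hstep : pvStepA (acc, false) t = (acc, true) := by simp [pvStepA, hm]
        rw [List.foldl_cons, hstep, ih]
        simp [List.findIdx?_cons, hm]
      · have hstep : pvStepA (acc, false) t = (acc, false) := by simp [pvStepA, hm]
        rw [List.foldl_cons, hstep, ih]
        simp only [Bool.false_eq_true, if_false, List.findIdx?_cons]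
        simp [hm]
        cases ts.findIdx? (fun t => decide (t ∈ pvMarkersA)) <;> simp

-- B's min over per-marker first-occurrence indices IS the index of the first marker token
theorem pv_min_eq_findIdx (ts : List String) :
    PySem.List.min? (pvMarkersB.filterMap (fun m => PySem.List.index? ts m)) (fun x => x)
    = ts.findIdx? (fun t => pvMarkersB.contains t) := by
  cases hf : ts.findIdx? (fun t => pvMarkersB.contains t) with
  | none =>
    rw [List.findIdx?_eq_none_iff] at hf
    rw [PySem.List.min?_eq_none_iff, List.filterMap_eq_nil_iff]
    intro m hm
    rw [Option.eq_none_iff_forall_ne_some]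
    intro k hk
    have ⟨hlt, hget, _⟩ := PySem.List.getElem_of_index?_eq_some hk
    have := hf ts[k] (by exact List.getElem_mem hlt)
    simp [hget] at this
    exact this (by simpa [pvMarkersB] using hm)
  | some i =>
    rw [List.findIdx?_eq_some_iff_getElem] at hf
    obtain ⟨hi, hp, hmin⟩ := hf
    -- ts[i] is a marker, so index? ts ts[i] = some i is in the filterMap list
    have hidx : PySem.List.index? ts ts[i] = some i := by
      rw [PySem.List.index?_eq_some_iff]
      refine ⟨ts.take i, ts.drop (i+1), ?_, by simp [hi.le], ?_⟩
      · conv_lhs => rw [← List.take_append_drop i ts, List.drop_eq_getElem_cons hi]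
      · intro hmem
        obtain ⟨j, hj, hje⟩ := List.mem_take_iff_getElem.mp hmem
        exact hmin j (by omega) (hje.symm ▸ hp)
    have hiL : i ∈ pvMarkersB.filterMap (fun m => PySem.List.index? ts m) := by
      rw [List.mem_filterMap]
      exact ⟨ts[i], by simpa using hp, hidx⟩
    have hne : pvMarkersB.filterMap (fun m => PySem.List.index? ts m) ≠ [] := by
      intro h; rw [h] at hiL; exact List.not_mem_nil hiL
    cases hmn : PySem.List.min? (pvMarkersB.filterMap (fun m => PySem.List.index? ts m)) (fun x => x) with
    | none => exact absurd ((PySem.List.min?_eq_none_iff _ _).mp hmn) hne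
    | some k =>
      have hkL := PySem.List.min?_mem hmn
      have hkle := PySem.List.min?_isMin hmn i hiL
      rw [List.mem_filterMap] at hkL
      obtain ⟨m, hm, hmk⟩ := hkL
      have ⟨hklt, hgk, _⟩ := PySem.List.getElem_of_index?_eq_some hmk
      have hpk : (pvMarkersB.contains ts[k]) = true := by
        rw [hgk]; simpa using hm
      have : ¬ k < i := fun hlt => hmin k hlt hpk
      simp only [Option.some.injEq]
      omega

-- ===== VERDICT =====
theorem get_usable_feature_name_py_spec : Claim_equal_get_usable_feature_name_py := by
  intro col _
  unfold Spec_get_usable_feature_name_py get_usable_feature_name_py get_usable_feature_name_py_alt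
  by_cases h : ((PySem.Str.split? col ":").getD []).length ≥ 2
  · rw [if_pos h, if_neg (by omega)]
    dsimp only
    rw [pv_loop_eq_drop, pv_min_eq_findIdx]
    rw [show pvMarkersB = pvMarkersA from rfl]
    simp only [Bool.false_eq_true, if_false, List.nil_append]
    cases hf : (((PySem.Str.split? ((PySem.List.pyGet? ((PySem.Str.split? col ":").getD []) 1).getD "") "_").getD []).findIdx? (fun t => pvMarkersA.contains t)) with
    | none => simp [PySem.Str.join]
    | some i =>
      dsimp only
      have : PySem.List.slice (((PySem.Str.split? ((PySem.List.pyGet? ((PySem.Str.split? col ":").getD []) 1).getD "") "_").getD [])) (some ((i : Int) + 1)) none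
          = (((PySem.Str.split? ((PySem.List.pyGet? ((PySem.Str.split? col ":").getD []) 1).getD "") "_").getD [])).drop (i + 1) := by
        have := PySem.List.slice_from_natCast (xs := ((PySem.Str.split? ((PySem.List.pyGet? ((PySem.Str.split? col ":").getD []) 1).getD "") "_").getD [])) (a := i + 1)
        push_cast at this ⊢
        exact this
      rw [this]
  · rw [if_neg h, if_pos (by omega)]
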